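-- pv_equiv track=rewrite | github.com/Nordic-OG-Raven/FinSight | src/validation/checks.py | _group_by_period
-- ===== SOURCE A (Python) =====
-- from typing import List, Dict, Any, Optional, Tuple
--
-- def _group_by_period(facts: List[Dict[str, Any]]) -> Dict[str, List[Dict[str, Any]]]:
--     """Group facts by reporting period - prioritize instant dates for balance sheet items"""
--     grouped = {}
--
--     for fact in facts:
--         # Use instant_date for balance sheet items, period_end for others
--         period = fact.get('instant_date') or fact.get('period_end')
--         if period:
--             period_key = str(period)
--             if period_key not in grouped:
--                 grouped[period_key] = []
--             grouped[period_key].append(fact)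
--
--     return grouped
-- ===== SOURCE B (Python) =====
-- def _group_by_period(facts):
--     """Group facts by reporting period: collect the distinct period keys in
--     first-seen order, then build each group with one filter pass per key."""
--     def _key(fact):
--         period = fact.get('instant_date') or fact.get('period_end')
--         return str(period) if period else None
--
--     keys = []
--     for fact in facts:
--         k = _key(fact)
--         if k is not None and k not in keys:
--             keys.append(k)
--     return {k: [f for f in facts if _key(f) == k] for k in keys}
-- ===== Notes on version B (the rewrite author's own statement) =====
-- stated objective: alternative
-- what changed: Replaces the single-pass dict-bucketing loop by a two-phase plan: first deduplicate the period keys in first-seen order, then build each group's list with a filter comprehension per key.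
import Mathlib
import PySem

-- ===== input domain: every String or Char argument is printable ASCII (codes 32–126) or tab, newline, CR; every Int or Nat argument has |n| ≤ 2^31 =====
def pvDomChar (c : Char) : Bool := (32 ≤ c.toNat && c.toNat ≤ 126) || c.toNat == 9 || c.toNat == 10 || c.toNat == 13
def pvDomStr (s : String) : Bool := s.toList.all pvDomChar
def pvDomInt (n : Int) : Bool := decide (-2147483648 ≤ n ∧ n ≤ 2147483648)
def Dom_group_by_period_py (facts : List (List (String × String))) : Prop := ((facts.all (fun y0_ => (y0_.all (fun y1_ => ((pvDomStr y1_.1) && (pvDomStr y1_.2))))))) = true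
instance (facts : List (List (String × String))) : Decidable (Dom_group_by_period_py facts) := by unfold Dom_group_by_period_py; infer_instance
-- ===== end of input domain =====

-- B groups by first collecting the distinct period keys in first-seen order and
-- then filtering the fact list once per key, instead of A's dict-bucketing pass;
-- objective: alternative decomposition (same return value).

-- ===== PORT A =====
-- one loop step of A: period = fact.get('instant_date') or fact.get('period_end');
-- if period: ensure bucket, append fact
def pvStepA (grouped : PySem.Dict String (List (List (String × String))))
    (fact : List (String × String)) : PySem.Dict String (List (List (String × String))) :=
  let period : Option String :=
    match (PySem.Dict.mk fact).get? "instant_date" with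
    | some s => if s = "" then (PySem.Dict.mk fact).get? "period_end" else some s
    | none => (PySem.Dict.mk fact).get? "period_end"
  match period with
  | some pk =>
      if pk = "" then grouped
      else
        let grouped' := if grouped.contains pk then grouped else grouped.insert pk []
        grouped'.modify pk [] (fun l => l ++ [fact])
  | none => grouped

def group_by_period_py (facts : List (List (String × String))) : List (String × List (List (String × String))) :=
  (facts.foldl pvStepA PySem.Dict.empty).items

-- ===== PORT B =====
-- B's helper _key(fact): the period key, or none for a falsy period
def pvKeyB (fact : List (String × String)) : Option String :=
  let period : Option String :=
    match (PySem.Dict.mk fact).get? "instant_date" with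
    | some s => if s = "" then (PySem.Dict.mk fact).get? "period_end" else some s
    | none => (PySem.Dict.mk fact).get? "period_end"
  match period with
  | some s => if s = "" then none else some s
  | none => none

-- B's first pass: distinct keys in first-seen order
def pvKeysB (facts : List (List (String × String))) : List String :=
  facts.foldl (fun ks f =>
    match pvKeyB f with
    | some k => if ks.contains k then ks else ks ++ [k]
    | none => ks) []

def group_by_period_py_alt (facts : List (List (String × String))) : List (String × List (List (String × String))) :=
  (pvKeysB facts).map (fun k => (k, facts.filter (fun f => pvKeyB f == some k)))

-- ===== PRECONDITION & SPEC =====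
def Spec_group_by_period_py (facts : List (List (String × String))) (out : List (String × List (List (String × String)))) : Prop := out = group_by_period_py_alt facts
instance (facts : List (List (String × String))) (out : List (String × List (List (String × String)))) : Decidable (Spec_group_by_period_py facts out) := by unfold Spec_group_by_period_py; infer_instance

-- ===== CLAIM (what is proved, stated in full; the proofs are below) =====
def Claim_equal_group_by_period_py : Prop := ∀ (facts : List (List (String × String))), Dom_group_by_period_py facts → Spec_group_by_period_py facts (group_by_period_py facts)

-- ===== LEMMAS AND PROOFS =====

-- A's step written through B's key helper
lemma pvStepA_eq (d : PySem.Dict String (List (List (String × String)))) (f : List (String × String)) :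
    pvStepA d f =
      match pvKeyB f with
      | some k => (if d.contains k then d else d.insert k []).modify k [] (fun l => l ++ [f])
      | none => d := by
  unfold pvStepA pvKeyB
  rcases h1 : (PySem.Dict.mk f).get? "instant_date" with _ | s
  · rcases h2 : (PySem.Dict.mk f).get? "period_end" with _ | t
    · simp
    · by_cases ht : t = "" <;> simp [ht]
  · by_cases hs : s = ""
    · rcases h2 : (PySem.Dict.mk f).get? "period_end" with _ | t
      · simp [hs]
      · by_cases ht : t = "" <;> simp [hs, ht]
    · simp [hs]

-- one step: keys evolve like B's key loop, stay Nodup, and each bucket gets the fact appended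
lemma pvStepA_keys (d : PySem.Dict String (List (List (String × String))))
    (f : List (String × String)) :
    (pvStepA d f).keys =
      (match pvKeyB f with
       | some k => if d.keys.contains k then d.keys else d.keys ++ [k]
       | none => d.keys) := by
  rw [pvStepA_eq]
  rcases hk : pvKeyB f with _ | k
  · rfl
  · simp only []
    by_cases hc : d.contains k = true
    · have hm : k ∈ d.keys := (PySem.Dict.contains_iff_mem_keys d k).mp hc
      rw [if_pos hc, PySem.Dict.keys_modify, PySem.Dict.keys_insert_of_contains d _ hc,
        if_pos (List.contains_iff_mem.mpr hm)]
    · have hc' : d.contains k = false := by simpa using hc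
      have hm : k ∉ d.keys := fun h => hc ((PySem.Dict.contains_iff_mem_keys d k).mpr h)
      rw [if_neg hc, PySem.Dict.keys_modify,
        PySem.Dict.keys_insert_of_contains _ _ (PySem.Dict.contains_insert_self d k []),
        PySem.Dict.keys_insert_of_not_contains d _ hc',
        if_neg (by simpa [List.contains_iff_mem] using hm)]

lemma pvStepA_nodup (d : PySem.Dict String (List (List (String × String)))) (hnd : d.keys.Nodup)
    (f : List (String × String)) : (pvStepA d f).keys.Nodup := by
  rw [pvStepA_keys d f]
  rcases pvKeyB f with _ | k
  · exact hnd
  · simp only []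
    by_cases hc : d.keys.contains k = true
    · rw [if_pos hc]; exact hnd
    · have hm : k ∉ d.keys := by simpa [List.contains_iff_mem] using hc
      rw [if_neg hc]
      refine List.Nodup.append hnd (List.nodup_singleton k) ?_
      intro a ha hb
      simp only [List.mem_singleton] at hb
      exact hm (hb ▸ ha)

lemma pvStepA_getD (d : PySem.Dict String (List (List (String × String))))
    (f : List (String × String)) (k' : String) :
    (pvStepA d f).getD k' [] =
      d.getD k' [] ++ (if pvKeyB f == some k' then [f] else []) := by
  rw [pvStepA_eq]
  rcases hk : pvKeyB f with _ | k
  · simp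
  · simp only []
    by_cases hc : d.contains k = true
    · rw [if_pos hc, PySem.Dict.getD_modify]
      by_cases he : k' = k
      · subst he; simp
      · simp [he, Ne.symm he]
    · have hc' : d.contains k = false := by simpa using hc
      rw [if_neg hc, PySem.Dict.getD_modify]
      by_cases he : k' = k
      · subst he
        simp [PySem.Dict.getD_of_not_contains d _ hc']
      · simp [he, Ne.symm he, PySem.Dict.getD_insert]

lemma pvFold_inv (l : List (List (String × String))) :
    ∀ (d : PySem.Dict String (List (List (String × String)))), d.keys.Nodup →
    (l.foldl pvStepA d).keys =
        (l.foldl (fun ks f =>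
          match pvKeyB f with
          | some k => if ks.contains k then ks else ks ++ [k]
          | none => ks) d.keys)
      ∧ (l.foldl pvStepA d).keys.Nodup
      ∧ ∀ k, (l.foldl pvStepA d).getD k [] =
          d.getD k [] ++ l.filter (fun f => pvKeyB f == some k) := by
  induction l with
  | nil => intro d hnd; exact ⟨rfl, hnd, fun k => by simp⟩
  | cons f l ih =>
    intro d hnd
    have hnd' := pvStepA_nodup d hnd f
    obtain ⟨h1, h2, h3⟩ := ih (pvStepA d f) hnd'
    refine ⟨?_, by simpa using h2, ?_⟩
    · simp only [List.foldl_cons]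
      rw [h1, pvStepA_keys d f]
    · intro k
      simp only [List.foldl_cons]
      rw [h3 k, pvStepA_getD d f k, List.filter_cons]
      by_cases hk : pvKeyB f == some k
      · simp [hk]
      · simp [hk]

-- ===== VERDICT (by name: the statement is the Claim_ definition above) =====
theorem group_by_period_py_spec : Claim_equal_group_by_period_py := by
  intro facts _
  unfold Spec_group_by_period_py group_by_period_py group_by_period_py_alt pvKeysB
  obtain ⟨h1, h2, h3⟩ := pvFold_inv facts PySem.Dict.empty (by simp [PySem.Dict.keys_empty])
  rw [PySem.Dict.items_eq_map_keys _ h2 ([] : List (List (String × String)))]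
  rw [h1]
  simp only [h3]
  simp [PySem.Dict.keys_empty, PySem.Dict.getD_empty]
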